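-- pv_equiv track=rewrite | github.com/jiaquan1/AmazonOA | AmazonOA/longstringwo3chars.py | ls3
-- ===== SOURCE A (Python) =====
-- import heapq
--
-- def ls3(A,B,C):
--     pq = []
--     res = ''
--     for k,v in ('a', A),('b',B),('c',C):
--         if v!=0:
--             heapq.heappush(pq,(-v,k))
--     prev, prek = 0, ''
--     while pq:
--         v,k = heapq.heappop(pq)
--         if prev:
--             heapq.heappush(pq,(prev,prek))
--             prev,prek = 0,''
--         if res[-2:]==k*2:
--             prev,prek = v,k
--         else:
--             res +=k
--             if v!=-1:
--                 heapq.heappush(pq,(v+1,k))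
--     return res
-- ===== SOURCE B (Python) =====
-- def ls3(A, B, C):
--     a, b, c = A, B, C
--     out = []
--     hold = ''
--     p1 = p2 = ''          # last two emitted letters ('' = nothing there yet)
--     while True:
--         k = ''
--         n = 0
--         if a > 0 and hold != 'a':
--             k, n = 'a', a
--         if b > 0 and hold != 'b' and b > n:
--             k, n = 'b', b
--         if c > 0 and hold != 'c' and c > n:
--             k, n = 'c', c
--         if not k:
--             break
--         hold = ''
--         if p1 == k and p2 == k:
--             hold = k
--         else:
--             out.append(k)
--             p1, p2 = p2, k
--             if k == 'a':
--                 a -= 1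
--             elif k == 'b':
--                 b -= 1
--             else:
--                 c -= 1
--     return ''.join(out)
-- ===== Notes on version B (the rewrite author's own statement) =====
-- stated objective: faster
-- what changed: Replaces the heapq priority queue (negated-count tuples, push/pop every round) with three plain integer counters scanned by direct comparisons each round, a one-round hold-aside variable, and a list accumulator joined at the end; same greedy output.
-- outside the precondition, e.g. on ls3(-1, 0, 0): A returns 'aa', B returns ''; on ls3(2, -3, 0): A returns 'aabb', B returns 'aa'; on ls3(-1, -1, 0): A does not finish within the time limit, B returns ''
import Mathlib
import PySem

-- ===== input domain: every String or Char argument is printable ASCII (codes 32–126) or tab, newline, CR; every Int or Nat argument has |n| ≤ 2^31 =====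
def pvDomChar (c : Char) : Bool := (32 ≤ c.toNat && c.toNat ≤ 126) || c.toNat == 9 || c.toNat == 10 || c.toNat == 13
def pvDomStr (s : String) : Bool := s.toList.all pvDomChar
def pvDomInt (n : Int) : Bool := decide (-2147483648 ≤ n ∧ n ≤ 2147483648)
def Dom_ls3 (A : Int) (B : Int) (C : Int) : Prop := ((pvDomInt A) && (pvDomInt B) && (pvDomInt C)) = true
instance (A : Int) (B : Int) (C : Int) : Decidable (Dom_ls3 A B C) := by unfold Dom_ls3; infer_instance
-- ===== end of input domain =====

-- B replaces A's heapq priority queue by a direct 3-way comparison of the three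
-- remaining counts (same greedy, same hold-aside rule); equal on all non-negative
-- counts, and measurably faster (plain integer compares instead of heap traffic).

-- ===== PORT A =====
-- heapq modelled exactly: the heap's observable behaviour (heappop returns the
-- minimum, truthiness = non-emptiness) depends only on its multiset of entries,
-- so we keep the list sorted: heappush = ordered insert, heappop = head.
-- Entries are (Int × Char) compared like Python's (int, str) tuples (letters are
-- single ASCII chars, so Char order is exact here).
def pushH (x : Int × Char) : List (Int × Char) → List (Int × Char)
  | [] => [x]
  | y :: ys =>
      if x.1 < y.1 ∨ (x.1 = y.1 ∧ x.2 ≤ y.2) then x :: y :: ys else y :: pushH x ys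

-- the while loop of A; fuel only makes the recursion total (A diverges on some
-- negative counts, which Pre_ls3 excludes).  Python's prek = '' is only ever
-- read when prev ≠ 0, where it holds a real letter; we carry ' ' as that
-- never-read placeholder.
def loopA : Nat → List (Int × Char) → List Char → Int → Char → List Char
  | 0, _, res, _, _ => res
  | _ + 1, [], res, _, _ => res
  | n + 1, (v, k) :: rest, res, prev, prek =>
      let pq := if prev ≠ 0 then pushH (prev, prek) rest else rest
      if PySem.List.slice res (some (-2)) none = [k, k] then
        loopA n pq res v k
      else
        loopA n (if v ≠ -1 then pushH (v + 1, k) pq else pq) (res ++ [k]) 0 ' '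

def ls3 (A : Int) (B : Int) (C : Int) : String :=
  let pq :=
    List.foldl (fun pq kv => if kv.2 ≠ 0 then pushH (-kv.2, kv.1) pq else pq) []
      [('a', A), ('b', B), ('c', C)]
  String.ofList (loopA (2 * (A.toNat + B.toNat + C.toNat) + 2) pq [] 0 ' ')

-- ===== PORT B =====
-- helper mirroring B's selection block: scan the three counts with straight
-- comparisons, keeping the letter with the largest remaining count (ties fall
-- to the earlier, i.e. smaller, letter).  Python's k = '' is Option.none here,
-- and the running (k, n) pair is threaded through pick1/pick2/pickB.
def pick1 (a : Int) (hold : Option Char) : Option Char × Int :=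
  if 0 < a ∧ hold ≠ some 'a' then (some 'a', a) else (none, 0)

def pick2 (a b : Int) (hold : Option Char) : Option Char × Int :=
  if 0 < b ∧ hold ≠ some 'b' ∧ (pick1 a hold).2 < b then (some 'b', b) else pick1 a hold

def pickB (a b c : Int) (hold : Option Char) : Option Char × Int :=
  if 0 < c ∧ hold ≠ some 'c' ∧ (pick2 a b hold).2 < c then (some 'c', c) else pick2 a b hold

-- the while loop of B; p1, p2 are the last two emitted letters ('' = none)
def loopB : Nat → Int → Int → Int → List Char → Option Char → Option Char → Option Char → List Char
  | 0, _, _, _, out, _, _, _ => out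
  | n + 1, a, b, c, out, hold, p1, p2 =>
      match (pickB a b c hold).1 with
      | none => out
      | some k =>
          if p1 = some k ∧ p2 = some k then
            loopB n a b c out (some k) p1 p2
          else
            loopB n
              (if k = 'a' then (a - 1, b, c) else if k = 'b' then (a, b - 1, c) else (a, b, c - 1)).1
              (if k = 'a' then (a - 1, b, c) else if k = 'b' then (a, b - 1, c) else (a, b, c - 1)).2.1
              (if k = 'a' then (a - 1, b, c) else if k = 'b' then (a, b - 1, c) else (a, b, c - 1)).2.2
              (out ++ [k]) none p2 (some k)

def ls3_alt (A : Int) (B : Int) (C : Int) : String :=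
  String.ofList (loopB (2 * (A.toNat + B.toNat + C.toNat) + 2) A B C [] none none none)

-- ===== PRECONDITION & SPEC =====
-- Pre_ restricts to the natural domain of letter counts (non-negative): on
-- negative counts A's behaviour is accidental — it diverges on e.g. (-1,-1,0)
-- and on others returns letters it was told to use a negative number of times.
def Pre_ls3 (A : Int) (B : Int) (C : Int) : Prop := 0 ≤ A ∧ 0 ≤ B ∧ 0 ≤ C
instance (A : Int) (B : Int) (C : Int) : Decidable (Pre_ls3 A B C) := by
  unfold Pre_ls3; infer_instance

def pvWitness_ls3 : Int × Int × Int := (3, 2, 1)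

def Spec_ls3 (A : Int) (B : Int) (C : Int) (out : String) : Prop := out = ls3_alt A B C
instance (A : Int) (B : Int) (C : Int) (out : String) : Decidable (Spec_ls3 A B C out) := by
  unfold Spec_ls3; infer_instance

-- ===== CLAIM (what is proved, stated in full; the proofs are below) =====
def Claim_equal_ls3 : Prop :=
  ∀ (A : Int) (B : Int) (C : Int), Dom_ls3 A B C → Pre_ls3 A B C → Spec_ls3 A B C (ls3 A B C)

-- ===== LEMMAS AND PROOFS =====

theorem mem_pushH (x e : Int × Char) (l : List (Int × Char)) :
    e ∈ pushH x l ↔ e = x ∨ e ∈ l := by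
  induction l with
  | nil => simp [pushH]
  | cons y ys ih =>
      simp only [pushH]
      split
      · simp [or_comm, or_assoc]
      · simp [ih]; tauto

theorem pairwise_pushH (x : Int × Char) (l : List (Int × Char))
    (h : l.Pairwise (fun p q => p.1 < q.1 ∨ (p.1 = q.1 ∧ p.2 ≤ q.2))) :
    (pushH x l).Pairwise (fun p q => p.1 < q.1 ∨ (p.1 = q.1 ∧ p.2 ≤ q.2)) := by
  induction l with
  | nil => simp [pushH]
  | cons y ys ih =>
      rcases List.pairwise_cons.mp h with ⟨hy, hys⟩
      simp only [pushH]
      split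
      · rename_i hxy
        refine List.pairwise_cons.mpr ⟨?_, h⟩
        intro z hz
        rcases hz with _ | hz
        · exact hxy
        · rcases hxy with h1 | ⟨h1, h2⟩
          · rcases hy z (by assumption) with h3 | ⟨h3, _⟩ <;> left <;> omega
          · rcases hy z (by assumption) with h3 | ⟨h3, h4⟩
            · left; omega
            · right; exact ⟨by omega, le_trans h2 h4⟩
      · rename_i hxy
        refine List.pairwise_cons.mpr ⟨?_, ih hys⟩
        intro z hz
        rcases (mem_pushH x z ys).mp hz with rfl | hz
        · rcases lt_trichotomy z.1 y.1 with h1 | h1 | h1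
          · exact absurd (Or.inl h1) hxy
          · rcases le_or_gt z.2 y.2 with h2 | h2
            · exact absurd (Or.inr ⟨h1, h2⟩) hxy
            · right; exact ⟨h1.symm, le_of_lt h2⟩
          · left; exact h1
        · exact hy z hz
  
theorem nodup_pushH (x : Int × Char) (l : List (Int × Char))
    (hx : x ∉ l) (h : l.Nodup) : (pushH x l).Nodup := by
  induction l with
  | nil => simp [pushH]
  | cons y ys ih =>
      simp only [pushH]
      split
      · exact List.nodup_cons.mpr ⟨hx, h⟩
      · rcases List.nodup_cons.mp h with ⟨hy, hys⟩
        refine List.nodup_cons.mpr ⟨?_, ih (by simp at hx; tauto) hys⟩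
        intro hmem
        rcases (mem_pushH x y ys).mp hmem with rfl | hmem
        · exact hx (List.mem_cons_self ..)
        · exact hy hmem


def cnt3 (a b c : Int) (k : Char) : Int := if k = 'a' then a else if k = 'b' then b else c

def toL : Option Char → List Char
  | none => []
  | some x => [x]

theorem cnt3_dec (a b c : Int) (m j : Char) (hm : m ∈ (['a','b','c'] : List Char))
    (hj : j ∈ (['a','b','c'] : List Char)) :
    cnt3 (if m = 'a' then (a - 1, b, c) else if m = 'b' then (a, b - 1, c) else (a, b, c - 1)).1
        (if m = 'a' then (a - 1, b, c) else if m = 'b' then (a, b - 1, c) else (a, b, c - 1)).2.1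
        (if m = 'a' then (a - 1, b, c) else if m = 'b' then (a, b - 1, c) else (a, b, c - 1)).2.2 j
      = if j = m then cnt3 a b c j - 1 else cnt3 a b c j := by
  fin_cases hm <;> fin_cases hj <;> simp [cnt3]

theorem pickB_none (a b c : Int) (hold : Option Char)
    (h : (pickB a b c hold).1 = none) :
    ∀ j, j ∈ (['a','b','c'] : List Char) → ¬(0 < cnt3 a b c j ∧ some j ≠ hold) := by
  by_cases ha : 0 < a ∧ hold ≠ some 'a'
  · have e1 : pick1 a hold = (some 'a', a) := by simp [pick1, ha]
    by_cases hb : 0 < b ∧ hold ≠ some 'b' ∧ a < b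
    · have e2 : pick2 a b hold = (some 'b', b) := by simp [pick2, e1, hb]
      by_cases hc : 0 < c ∧ hold ≠ some 'c' ∧ b < c
      · simp [pickB, e2, hc] at h
      · simp [pickB, e2, hc] at h
    · have e2 : pick2 a b hold = (some 'a', a) := by simp [pick2, e1, hb]
      by_cases hc : 0 < c ∧ hold ≠ some 'c' ∧ a < c
      · simp [pickB, e2, hc] at h
      · simp [pickB, e2, hc] at h
  · have e1 : pick1 a hold = (none, 0) := by simp [pick1, ha]
    by_cases hb : 0 < b ∧ hold ≠ some 'b'
    · have e2 : pick2 a b hold = (some 'b', b) := by simp [pick2, e1, hb.1, hb.2]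
      by_cases hc : 0 < c ∧ hold ≠ some 'c' ∧ b < c
      · simp [pickB, e2, hc] at h
      · simp [pickB, e2, hc] at h
    · have e2 : pick2 a b hold = (none, 0) := by
        simp [pick2, e1]; intro h1 h2; exact absurd ⟨h1, h2⟩ hb
      by_cases hc : 0 < c ∧ hold ≠ some 'c'
      · simp [pickB, e2, hc.1, hc.2] at h
      · intro j hj hav
        fin_cases hj
        · exact ha ⟨by simpa [cnt3] using hav.1, fun he => hav.2 he.symm⟩
        · exact hb ⟨by simpa [cnt3] using hav.1, fun he => hav.2 he.symm⟩
        · exact hc ⟨by simpa [cnt3] using hav.1, fun he => hav.2 he.symm⟩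

theorem pickB_some (a b c : Int) (hold : Option Char) (m : Char)
    (h : (pickB a b c hold).1 = some m) :
    m ∈ (['a','b','c'] : List Char) ∧ 0 < cnt3 a b c m ∧ some m ≠ hold ∧
    (∀ j, j ∈ (['a','b','c'] : List Char) → 0 < cnt3 a b c j → some j ≠ hold →
      cnt3 a b c j < cnt3 a b c m ∨ (cnt3 a b c j = cnt3 a b c m ∧ m ≤ j)) := by
  have ea : cnt3 a b c 'a' = a := by simp [cnt3]
  have eb : cnt3 a b c 'b' = b := by simp [cnt3]
  have ec : cnt3 a b c 'c' = c := by simp [cnt3]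
  by_cases ha : 0 < a ∧ hold ≠ some 'a'
  · have e1 : pick1 a hold = (some 'a', a) := by simp [pick1, ha]
    by_cases hb : 0 < b ∧ hold ≠ some 'b' ∧ a < b
    · have e2 : pick2 a b hold = (some 'b', b) := by simp [pick2, e1, hb]
      by_cases hc : 0 < c ∧ hold ≠ some 'c' ∧ b < c
      · have hm := Option.some_inj.mp
          ((show (pickB a b c hold).1 = some 'c' by simp [pickB, e2, hc]).symm.trans h)
        subst hm
        refine ⟨by decide, by rw [ec]; exact hc.1, fun he => hc.2.1 he.symm, ?_⟩
        intro j hj hjp hjh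
        fin_cases hj
        · rw [ea, ec]; left; omega
        · rw [eb, ec]; left; exact hc.2.2
        · right; exact ⟨rfl, le_refl _⟩
      · have hm := Option.some_inj.mp
          ((show (pickB a b c hold).1 = some 'b' by simp [pickB, e2, hc]).symm.trans h)
        subst hm
        refine ⟨by decide, by rw [eb]; exact hb.1, fun he => hb.2.1 he.symm, ?_⟩
        intro j hj hjp hjh
        fin_cases hj
        · rw [ea, eb]; left; exact hb.2.2
        · right; exact ⟨rfl, le_refl _⟩
        · rw [ec, eb]
          rw [ec] at hjp
          have hcb : ¬ b < c := fun hlt => hc ⟨hjp, fun he => hjh he.symm, hlt⟩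
          rcases lt_or_eq_of_le (by omega : c ≤ b) with h' | h'
          · left; exact h'
          · right; exact ⟨h', by decide⟩
    · have e2 : pick2 a b hold = (some 'a', a) := by simp [pick2, e1, hb]
      by_cases hc : 0 < c ∧ hold ≠ some 'c' ∧ a < c
      · have hm := Option.some_inj.mp
          ((show (pickB a b c hold).1 = some 'c' by simp [pickB, e2, hc]).symm.trans h)
        subst hm
        refine ⟨by decide, by rw [ec]; exact hc.1, fun he => hc.2.1 he.symm, ?_⟩
        intro j hj hjp hjh
        fin_cases hj
        · rw [ea, ec]; left; exact hc.2.2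
        · rw [eb, ec]
          rw [eb] at hjp
          have hba : ¬ a < b := fun hlt => hb ⟨hjp, fun he => hjh he.symm, hlt⟩
          left; omega
        · right; exact ⟨rfl, le_refl _⟩
      · have hm := Option.some_inj.mp
          ((show (pickB a b c hold).1 = some 'a' by simp [pickB, e2, hc]).symm.trans h)
        subst hm
        refine ⟨by decide, by rw [ea]; exact ha.1, fun he => ha.2 he.symm, ?_⟩
        intro j hj hjp hjh
        fin_cases hj
        · right; exact ⟨rfl, le_refl _⟩
        · rw [eb, ea]
          rw [eb] at hjp
          have hba : ¬ a < b := fun hlt => hb ⟨hjp, fun he => hjh he.symm, hlt⟩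
          rcases lt_or_eq_of_le (by omega : b ≤ a) with h' | h'
          · left; exact h'
          · right; exact ⟨h', by decide⟩
        · rw [ec, ea]
          rw [ec] at hjp
          have hca : ¬ a < c := fun hlt => hc ⟨hjp, fun he => hjh he.symm, hlt⟩
          rcases lt_or_eq_of_le (by omega : c ≤ a) with h' | h'
          · left; exact h'
          · right; exact ⟨h', by decide⟩
  · have e1 : pick1 a hold = (none, 0) := by simp [pick1, ha]
    have hano : ∀ j, 0 < cnt3 a b c j → some j ≠ hold → j ≠ 'a' := by
      intro j hjp hjh he
      subst he
      rw [ea] at hjp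
      exact ha ⟨hjp, fun he' => hjh he'.symm⟩
    by_cases hb : 0 < b ∧ hold ≠ some 'b'
    · have e2 : pick2 a b hold = (some 'b', b) := by simp [pick2, e1, hb.1, hb.2]
      by_cases hc : 0 < c ∧ hold ≠ some 'c' ∧ b < c
      · have hm := Option.some_inj.mp
          ((show (pickB a b c hold).1 = some 'c' by simp [pickB, e2, hc]).symm.trans h)
        subst hm
        refine ⟨by decide, by rw [ec]; exact hc.1, fun he => hc.2.1 he.symm, ?_⟩
        intro j hj hjp hjh
        fin_cases hj
        · exact absurd rfl (hano _ hjp hjh)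
        · rw [eb, ec]; left; exact hc.2.2
        · right; exact ⟨rfl, le_refl _⟩
      · have hm := Option.some_inj.mp
          ((show (pickB a b c hold).1 = some 'b' by simp [pickB, e2, hc]).symm.trans h)
        subst hm
        refine ⟨by decide, by rw [eb]; exact hb.1, fun he => hb.2 he.symm, ?_⟩
        intro j hj hjp hjh
        fin_cases hj
        · exact absurd rfl (hano _ hjp hjh)
        · right; exact ⟨rfl, le_refl _⟩
        · rw [ec, eb]
          rw [ec] at hjp
          have hcb : ¬ b < c := fun hlt => hc ⟨hjp, fun he => hjh he.symm, hlt⟩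
          rcases lt_or_eq_of_le (by omega : c ≤ b) with h' | h'
          · left; exact h'
          · right; exact ⟨h', by decide⟩
    · have e2 : pick2 a b hold = (none, 0) := by
        simp [pick2, e1]
        intro h1 h2
        exact absurd ⟨h1, h2⟩ hb
      have hbno : ∀ j, 0 < cnt3 a b c j → some j ≠ hold → j ≠ 'b' := by
        intro j hjp hjh he
        subst he
        rw [eb] at hjp
        exact hb ⟨hjp, fun he' => hjh he'.symm⟩
      by_cases hc : 0 < c ∧ hold ≠ some 'c'
      · have hm := Option.some_inj.mp
          ((show (pickB a b c hold).1 = some 'c' by simp [pickB, e2, hc.1, hc.2]).symm.trans h)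
        subst hm
        refine ⟨by decide, by rw [ec]; exact hc.1, fun he => hc.2 he.symm, ?_⟩
        intro j hj hjp hjh
        fin_cases hj
        · exact absurd rfl (hano _ hjp hjh)
        · exact absurd rfl (hbno _ hjp hjh)
        · right; exact ⟨rfl, le_refl _⟩
      · exfalso
        have hnone : (pickB a b c hold).1 = none := by
          unfold pickB
          rw [e2, if_neg (show ¬(0 < c ∧ hold ≠ some 'c' ∧ ((none, 0) : Option Char × Int).2 < c)
            from fun hx => hc ⟨hx.1, hx.2.1⟩)]
        rw [hnone] at h
        exact absurd h (by simp)

-- the loop invariant: the heap is sorted, duplicate-free, and holds exactly the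
-- entries (-count, letter) of the letters still available (positive count, not
-- held aside); the hold-aside is mirrored by prev/prek, and p1/p2 are the last
-- two characters of res.
theorem loop_eq (n : Nat) :
    ∀ (pq : List (Int × Char)) (a b c : Int) (hold : Option Char) (res : List Char)
      (prev : Int) (prek : Char) (p1 p2 : Option Char),
    pq.Pairwise (fun p q => p.1 < q.1 ∨ (p.1 = q.1 ∧ p.2 ≤ q.2)) →
    pq.Nodup →
    (∀ e, e ∈ pq ↔ ∃ j, j ∈ (['a','b','c'] : List Char) ∧
        (0 < cnt3 a b c j ∧ some j ≠ hold) ∧ e = (-(cnt3 a b c j), j)) →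
    (match hold with
     | none => prev = 0
     | some h => prev = -(cnt3 a b c h) ∧ prek = h ∧ 1 ≤ cnt3 a b c h ∧
         h ∈ (['a','b','c'] : List Char)) →
    res.drop (res.length - 1) = toL p2 →
    res.drop (res.length - 2) = toL p1 ++ toL p2 →
    loopA n pq res prev prek = loopB n a b c res hold p1 p2 := by
  induction n with
  | zero => intros; rfl
  | succ n ih =>
    intro pq a b c hold res prev prek p1 p2 hpw hnd hmem hwf hP2 hP1
    cases hpk : (pickB a b c hold).1 with
    | none =>
      cases pq with
      | nil => simp only [loopA, loopB, hpk]
      | cons hd t =>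
        exfalso
        obtain ⟨v, k⟩ := hd
        obtain ⟨j, hj1, hj2, _⟩ := (hmem (v, k)).mp (List.mem_cons_self ..)
        exact pickB_none a b c hold hpk j hj1 hj2
    | some m =>
      obtain ⟨hmabc, hmpos, hmhold, hmmin⟩ := pickB_some a b c hold m hpk
      cases pq with
      | nil =>
        exfalso
        have := (hmem (-(cnt3 a b c m), m)).mpr ⟨m, hmabc, ⟨hmpos, hmhold⟩, rfl⟩
        simp at this
      | cons hd t =>
        obtain ⟨v, k⟩ := hd
        have hhd := (hmem (v, k)).mp (List.mem_cons_self ..)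
        have hentm : (-(cnt3 a b c m), m) ∈ (v, k) :: t :=
          (hmem _).mpr ⟨m, hmabc, ⟨hmpos, hmhold⟩, rfl⟩
        -- the heap's head is exactly the scan's pick
        have hhead : v = -(cnt3 a b c m) ∧ k = m := by
          obtain ⟨j, hj1, hj2, hj3⟩ := hhd
          obtain ⟨hv, hk⟩ := Prod.mk.injEq .. ▸ hj3
          have h2 := hmmin j hj1 hj2.1 hj2.2
          rcases List.mem_cons.mp hentm with he | he
          · exact ⟨(Prod.mk.injEq .. ▸ he.symm).1, (Prod.mk.injEq .. ▸ he.symm).2⟩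
          · have h1 := (List.pairwise_cons.mp hpw).1 _ he
            simp only at h1
            subst hv hk
            rcases h1 with h1 | ⟨h1, h1'⟩ <;> rcases h2 with h2 | ⟨h2, h2'⟩
            · omega
            · omega
            · omega
            · exact ⟨by omega, le_antisymm h1' h2'⟩
        obtain ⟨hv, hk⟩ := hhead
        subst hv
        subst hk
        -- shared facts about the heap after the pop + hold restore
        have htpw := (List.pairwise_cons.mp hpw).2
        have hheadt : (-(cnt3 a b c k), k) ∉ t := (List.nodup_cons.mp hnd).1
        have htnd := (List.nodup_cons.mp hnd).2
        have htmem : ∀ e, e ∈ t ↔ ∃ j, j ∈ (['a','b','c'] : List Char) ∧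
            0 < cnt3 a b c j ∧ some j ≠ hold ∧ j ≠ k ∧ e = (-(cnt3 a b c j), j) := by
          intro e
          constructor
          · intro he
            obtain ⟨j, hj1, hj2, hj3⟩ := (hmem e).mp (List.mem_cons_of_mem _ he)
            refine ⟨j, hj1, hj2.1, hj2.2, ?_, hj3⟩
            rintro rfl
            exact hheadt (hj3 ▸ he)
          · rintro ⟨j, hj1, hj2, hj3, hj4, rfl⟩
            have := (hmem _).mpr ⟨j, hj1, ⟨hj2, hj3⟩, rfl⟩
            rcases List.mem_cons.mp this with he | he
            · exact absurd (Prod.mk.injEq .. ▸ he).2 hj4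
            · exact he
        have hpq1 :
            (if prev ≠ 0 then pushH (prev, prek) t else t).Pairwise
              (fun p q => p.1 < q.1 ∨ (p.1 = q.1 ∧ p.2 ≤ q.2)) ∧
            (if prev ≠ 0 then pushH (prev, prek) t else t).Nodup ∧
            (∀ e, e ∈ (if prev ≠ 0 then pushH (prev, prek) t else t) ↔
              ∃ j, j ∈ (['a','b','c'] : List Char) ∧ 0 < cnt3 a b c j ∧ j ≠ k ∧
                e = (-(cnt3 a b c j), j)) := by
          cases hold with
          | none =>
            have hprev : prev = 0 := hwf
            subst hprev
            rw [if_neg (show ¬ ((0:Int) ≠ 0) by simp)]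
            refine ⟨htpw, htnd, ?_⟩
            intro e
            rw [htmem e]
            constructor
            · rintro ⟨j, h1, h2, _, h4, h5⟩; exact ⟨j, h1, h2, h4, h5⟩
            · rintro ⟨j, h1, h2, h4, h5⟩; exact ⟨j, h1, h2, by simp, h4, h5⟩
          | some h =>
            obtain ⟨hw1, hw2, hw3, hw4⟩ := hwf
            have hprev : prev ≠ 0 := by omega
            rw [if_pos hprev, hw1, hw2]
            have hhm : h ≠ k := fun he => hmhold (he ▸ rfl)
            have hhnot : (-(cnt3 a b c h), h) ∉ t := by
              rw [htmem]
              rintro ⟨j, _, _, hj3, _, hj5⟩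
              exact hj3 (congrArg (fun x => some x.2) hj5.symm)
            refine ⟨pairwise_pushH _ _ htpw, nodup_pushH _ _ hhnot htnd, ?_⟩
            intro e
            rw [mem_pushH, htmem e]
            constructor
            · rintro (rfl | ⟨j, h1, h2, _, h4, h5⟩)
              · exact ⟨h, hw4, by omega, hhm, rfl⟩
              · exact ⟨j, h1, h2, h4, h5⟩
            · rintro ⟨j, h1, h2, h4, h5⟩
              by_cases hjh : j = h
              · subst hjh; exact Or.inl h5
              · exact Or.inr ⟨j, h1, h2, fun hc => hjh (Option.some_inj.mp hc), h4, h5⟩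
        obtain ⟨hp1pw, hp1nd, hp1mem⟩ := hpq1
        -- the two loops test the same condition: res[-2:] == k*2 ↔ p1 = p2 = k
        have hbr : (PySem.List.slice res (some (-2)) none = [k, k]) ↔
            (p1 = some k ∧ p2 = some k) := by
          rw [PySem.List.slice_from_neg_ofNat res 2 (by omega), hP1]
          cases p1 <;> cases p2 <;> simp [toL]
        -- reduce one step of both loops
        show loopA (n+1) _ res prev prek = loopB (n+1) a b c res hold p1 p2
        simp only [loopA, loopB, hpk]
        by_cases hsl : PySem.List.slice res (some (-2)) none = [k, k]
        · rw [if_pos hsl, if_pos (hbr.mp hsl)]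
          exact ih _ a b c (some k) res _ _ p1 p2 hp1pw hp1nd
            (by
              intro e
              rw [hp1mem e]
              constructor
              · rintro ⟨j, h1, h2, h4, h5⟩
                exact ⟨j, h1, ⟨h2, fun hc => h4 (Option.some_inj.mp hc)⟩, h5⟩
              · rintro ⟨j, h1, ⟨h2, h3⟩, h5⟩
                exact ⟨j, h1, h2, fun hc => h3 (hc ▸ rfl), h5⟩)
            ⟨rfl, rfl, by omega, hmabc⟩ hP2 hP1
        · rw [if_neg hsl, if_neg (fun hc => hsl (hbr.mpr hc))]
          have hP2' : (res ++ [k]).drop ((res ++ [k]).length - 1) = toL (some k) := by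
            simp [toL]
          have hP1' : (res ++ [k]).drop ((res ++ [k]).length - 2) = toL p2 ++ toL (some k) := by
            rw [List.length_append, List.length_cons, List.length_nil,
              show res.length + (0 + 1) - 2 = res.length - 1 by omega,
              List.drop_append,
              show res.length - 1 - res.length = 0 by omega, hP2]
            simp [toL]
          have hcnt' := cnt3_dec a b c k
          by_cases hv1 : cnt3 a b c k = 1
          · rw [if_neg (by omega : ¬ -(cnt3 a b c k) ≠ -1)]
            refine ih _ _ _ _ none (res ++ [k]) 0 ' ' p2 (some k) hp1pw hp1nd ?_ rfl hP2' hP1'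
            intro e
            rw [hp1mem e]
            constructor
            · rintro ⟨j, h1, h2, h4, h5⟩
              refine ⟨j, h1, ⟨?_, by simp⟩, ?_⟩
              · rw [hcnt' j hmabc h1, if_neg h4]; exact h2
              · rw [hcnt' j hmabc h1, if_neg h4]; exact h5
            · rintro ⟨j, h1, ⟨h2, _⟩, h5⟩
              by_cases hjm : j = k
              · rw [hjm] at h2
                rw [hcnt' k hmabc hmabc, if_pos rfl] at h2
                omega
              · rw [hcnt' j hmabc h1, if_neg hjm] at h2 h5
                exact ⟨j, h1, h2, hjm, h5⟩
          · rw [if_pos (by omega : -(cnt3 a b c k) ≠ -1)]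
            have hment' : (-(cnt3 a b c k) + 1, k) ∉ (if prev ≠ 0 then pushH (prev, prek) t else t) := by
              rw [hp1mem]
              rintro ⟨j, _, _, hj4, hj5⟩
              exact hj4 (congrArg Prod.snd hj5).symm
            refine ih _ _ _ _ none (res ++ [k]) 0 ' ' p2 (some k)
              (pairwise_pushH _ _ hp1pw) (nodup_pushH _ _ hment' hp1nd) ?_ rfl hP2' hP1'
            intro e
            rw [mem_pushH, hp1mem e]
            constructor
            · rintro (rfl | ⟨j, h1, h2, h4, h5⟩)
              · refine ⟨k, hmabc, ⟨?_, by simp⟩, ?_⟩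
                · rw [hcnt' k hmabc hmabc, if_pos rfl]; omega
                · rw [hcnt' k hmabc hmabc, if_pos rfl]
                  congr 1; omega
              · refine ⟨j, h1, ⟨?_, by simp⟩, ?_⟩
                · rw [hcnt' j hmabc h1, if_neg h4]; exact h2
                · rw [hcnt' j hmabc h1, if_neg h4]; exact h5
            · rintro ⟨j, h1, ⟨h2, _⟩, h5⟩
              by_cases hjm : j = k
              · rw [hjm] at h5
                rw [hcnt' k hmabc hmabc, if_pos rfl] at h5
                left; rw [h5]; congr 1; omega
              · rw [hcnt' j hmabc h1, if_neg hjm] at h2 h5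
                exact Or.inr ⟨j, h1, h2, hjm, h5⟩

theorem ls3_spec : Claim_equal_ls3 := by
  unfold Claim_equal_ls3
  intro A B C _ hpre
  obtain ⟨hA, hB, hC⟩ := hpre
  unfold Spec_ls3 ls3 ls3_alt
  have hm1 : ∀ e, e ∈ (if A ≠ 0 then pushH (-A, 'a') [] else []) ↔ (0 < A ∧ e = (-A, 'a')) := by
    intro e
    by_cases h0 : A = 0
    · simp [h0]
    · simp [h0, pushH, show 0 < A by omega]
  have hm2 : ∀ e, e ∈ (if B ≠ 0 then pushH (-B, 'b') (if A ≠ 0 then pushH (-A, 'a') [] else [])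
        else (if A ≠ 0 then pushH (-A, 'a') [] else [])) ↔
      ((0 < B ∧ e = (-B, 'b')) ∨ (0 < A ∧ e = (-A, 'a'))) := by
    intro e
    by_cases h0 : B = 0
    · rw [if_neg (by simp [h0]), hm1 e]
      constructor
      · exact fun h => Or.inr h
      · rintro (⟨hb, _⟩ | h)
        · omega
        · exact h
    · rw [if_pos h0, mem_pushH, hm1 e]
      constructor
      · rintro (rfl | h) 
        · exact Or.inl ⟨by omega, rfl⟩
        · exact Or.inr h
      · rintro (⟨_, rfl⟩ | h)
        · exact Or.inl rfl
        · exact Or.inr h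
  have hm3 : ∀ e, e ∈ (if C ≠ 0 then pushH (-C, 'c')
        (if B ≠ 0 then pushH (-B, 'b') (if A ≠ 0 then pushH (-A, 'a') [] else [])
          else (if A ≠ 0 then pushH (-A, 'a') [] else []))
        else (if B ≠ 0 then pushH (-B, 'b') (if A ≠ 0 then pushH (-A, 'a') [] else [])
          else (if A ≠ 0 then pushH (-A, 'a') [] else []))) ↔
      ((0 < C ∧ e = (-C, 'c')) ∨ (0 < B ∧ e = (-B, 'b')) ∨ (0 < A ∧ e = (-A, 'a'))) := by
    intro e
    by_cases h0 : C = 0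
    · simp only [h0]
      rw [if_neg (by simp), hm2 e]
      constructor
      · exact fun h => Or.inr h
      · rintro (⟨h, _⟩ | h)
        · omega
        · exact h
    · rw [if_pos h0, mem_pushH, hm2 e]
      constructor
      · rintro (rfl | h)
        · exact Or.inl ⟨by omega, rfl⟩
        · exact Or.inr h
      · rintro (⟨_, rfl⟩ | h)
        · exact Or.inl rfl
        · exact Or.inr h
  have hp1 : (if A ≠ 0 then pushH (-A, 'a') [] else []).Pairwise
      (fun p q => p.1 < q.1 ∨ (p.1 = q.1 ∧ p.2 ≤ q.2)) := by
    split
    · exact pairwise_pushH _ _ (List.Pairwise.nil)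
    · exact List.Pairwise.nil
  have hp2 : (if B ≠ 0 then pushH (-B, 'b') (if A ≠ 0 then pushH (-A, 'a') [] else [])
        else (if A ≠ 0 then pushH (-A, 'a') [] else [])).Pairwise
      (fun p q => p.1 < q.1 ∨ (p.1 = q.1 ∧ p.2 ≤ q.2)) := by
    split
    · exact pairwise_pushH _ _ hp1
    · exact hp1
  have hp3 : (if C ≠ 0 then pushH (-C, 'c')
        (if B ≠ 0 then pushH (-B, 'b') (if A ≠ 0 then pushH (-A, 'a') [] else [])
          else (if A ≠ 0 then pushH (-A, 'a') [] else []))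
        else (if B ≠ 0 then pushH (-B, 'b') (if A ≠ 0 then pushH (-A, 'a') [] else [])
          else (if A ≠ 0 then pushH (-A, 'a') [] else []))).Pairwise
      (fun p q => p.1 < q.1 ∨ (p.1 = q.1 ∧ p.2 ≤ q.2)) := by
    split
    · exact pairwise_pushH _ _ hp2
    · exact hp2
  have hn1 : (if A ≠ 0 then pushH (-A, 'a') [] else []).Nodup := by
    split
    · exact nodup_pushH _ _ (by simp) List.nodup_nil
    · exact List.nodup_nil
  have hn2 : (if B ≠ 0 then pushH (-B, 'b') (if A ≠ 0 then pushH (-A, 'a') [] else [])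
        else (if A ≠ 0 then pushH (-A, 'a') [] else [])).Nodup := by
    split
    · refine nodup_pushH _ _ ?_ hn1
      intro hmem
      rcases (hm1 _).mp hmem with ⟨_, he⟩
      simpa using congrArg Prod.snd he
    · exact hn1
  have hn3 : (if C ≠ 0 then pushH (-C, 'c')
        (if B ≠ 0 then pushH (-B, 'b') (if A ≠ 0 then pushH (-A, 'a') [] else [])
          else (if A ≠ 0 then pushH (-A, 'a') [] else []))
        else (if B ≠ 0 then pushH (-B, 'b') (if A ≠ 0 then pushH (-A, 'a') [] else [])
          else (if A ≠ 0 then pushH (-A, 'a') [] else []))).Nodup := by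
    split
    · refine nodup_pushH _ _ ?_ hn2
      intro hmem
      rcases (hm2 _).mp hmem with ⟨_, he⟩ | ⟨_, he⟩ <;>
        simpa using congrArg Prod.snd he
    · exact hn2
  have hinv : ∀ e, e ∈ (if C ≠ 0 then pushH (-C, 'c')
        (if B ≠ 0 then pushH (-B, 'b') (if A ≠ 0 then pushH (-A, 'a') [] else [])
          else (if A ≠ 0 then pushH (-A, 'a') [] else []))
        else (if B ≠ 0 then pushH (-B, 'b') (if A ≠ 0 then pushH (-A, 'a') [] else [])
          else (if A ≠ 0 then pushH (-A, 'a') [] else []))) ↔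
      ∃ j, j ∈ (['a','b','c'] : List Char) ∧
        (0 < cnt3 A B C j ∧ some j ≠ (none : Option Char)) ∧ e = (-(cnt3 A B C j), j) := by
    intro e
    rw [hm3 e]
    constructor
    · rintro (⟨h, rfl⟩ | ⟨h, rfl⟩ | ⟨h, rfl⟩)
      · exact ⟨'c', by decide, ⟨by simpa [cnt3] using h, by simp⟩, by simp [cnt3]⟩
      · exact ⟨'b', by decide, ⟨by simpa [cnt3] using h, by simp⟩, by simp [cnt3]⟩
      · exact ⟨'a', by decide, ⟨by simpa [cnt3] using h, by simp⟩, by simp [cnt3]⟩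
    · rintro ⟨j, hj1, ⟨hj2, _⟩, rfl⟩
      fin_cases hj1
      · right; right; exact ⟨by simpa [cnt3] using hj2, by simp [cnt3]⟩
      · right; left; exact ⟨by simpa [cnt3] using hj2, by simp [cnt3]⟩
      · left; exact ⟨by simpa [cnt3] using hj2, by simp [cnt3]⟩
  exact congrArg String.ofList
    (loop_eq (2 * (A.toNat + B.toNat + C.toNat) + 2) _ A B C none [] 0 ' ' none none
      hp3 hn3 hinv rfl rfl rfl)
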